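-- pv_equiv track=rewrite | github.com/ixxet/COMP262-NLP-and-Recommendation-Systems | Assign1/exercise1_web_scraping.py | get_companies
-- ===== SOURCE A (Python) =====
-- def get_companies(page_text):
--     """Extracts companies offering jobs from the page text."""
--     companies = []
--     lines = page_text.split("\n")
--
--     for line in lines:
--         line = line.strip()
--         if line.startswith("IBM Canada") or (line.startswith("Companies Offering Jobs") is False
--                                               and "IBM" in line and "Bell" in line):
--             # The companies are listed as a comma-separated string
--             companies = [c.strip() for c in line.replace(" and more.", "").split(",") if c.strip()]
--             break
--
--     # Fallback: search after "Companies Offering Jobs" heading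
--     if not companies:
--         capture = False
--         for line in lines:
--             line = line.strip()
--             if "Companies Offering Jobs" in line:
--                 capture = True
--                 continue
--             if capture and line:
--                 companies = [c.strip() for c in line.replace(" and more.", "").split(",") if c.strip()]
--                 break
--
--     return companies
-- ===== SOURCE B (Python) =====
-- def get_companies(page_text):
--     """Extracts companies offering jobs from the page text (single-pass candidate collection)."""
--     primary = None          # first line satisfying the primary condition
--     heading_seen = False    # a "Companies Offering Jobs" line has been passed
--     fallback = None         # first non-empty line after the heading
--
--     for raw in page_text.split("\n"):
--         line = raw.strip()
--         if primary is None and (line.startswith("IBM Canada")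
--                 or (not line.startswith("Companies Offering Jobs")
--                     and "IBM" in line and "Bell" in line)):
--             primary = line
--         if "Companies Offering Jobs" in line:
--             heading_seen = True
--         elif heading_seen and line and fallback is None:
--             fallback = line
--
--     def parse(line):
--         return [c.strip() for c in line.replace(" and more.", "").split(",") if c.strip()]
--
--     if primary is not None:
--         companies = parse(primary)
--         if companies:
--             return companies
--     return parse(fallback) if fallback is not None else []
-- ===== Notes on version B (the rewrite author's own statement) =====
-- stated objective: alternative
-- what changed: A's two separate full scans (primary-condition loop, then a capture-flag fallback loop) are merged into one pass that simultaneously records the first primary-matching line and the first non-empty line after the jobs heading, parsing the chosen candidate once at the end.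
import Mathlib
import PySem

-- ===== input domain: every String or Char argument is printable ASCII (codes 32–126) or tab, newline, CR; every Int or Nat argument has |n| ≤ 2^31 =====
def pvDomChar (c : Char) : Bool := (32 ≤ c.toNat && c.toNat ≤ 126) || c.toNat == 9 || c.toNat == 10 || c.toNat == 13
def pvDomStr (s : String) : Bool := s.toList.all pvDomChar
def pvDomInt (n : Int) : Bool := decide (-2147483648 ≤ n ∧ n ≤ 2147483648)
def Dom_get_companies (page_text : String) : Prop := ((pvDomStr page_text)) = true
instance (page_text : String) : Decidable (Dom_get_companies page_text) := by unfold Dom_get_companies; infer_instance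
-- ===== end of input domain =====

-- B replaces A's two full scans of the lines by one pass that collects both the primary
-- and the fallback candidate line, parsing afterwards (objective: alternative decomposition).

-- ===== PORT A =====
-- [c.strip() for c in line.replace(" and more.", "").split(",") if c.strip()]
def aParse (line : List Char) : List String :=
  ((((PySem.Chars.splitOn (PySem.Chars.replace line (" and more.".toList) ("".toList))
      (",".toList)).map PySem.Chars.strip).filter (fun c => !c.isEmpty)).map String.ofList)

-- A's first loop: break (returning the parsed list) on the first matching line
def aLoop1 : List (List Char) → List String
  | [] => []
  | l :: ls =>
    let line := PySem.Chars.strip l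
    if PySem.Chars.startswith line ("IBM Canada".toList) ||
       (!(PySem.Chars.startswith line ("Companies Offering Jobs".toList)) &&
        PySem.Chars.isIn ("IBM".toList) line && PySem.Chars.isIn ("Bell".toList) line)
    then aParse line
    else aLoop1 ls

-- A's fallback loop with its `capture` flag
def aLoop2 : List (List Char) → Bool → List String
  | [], _ => []
  | l :: ls, capture =>
    let line := PySem.Chars.strip l
    if PySem.Chars.isIn ("Companies Offering Jobs".toList) line then aLoop2 ls true
    else if capture && !line.isEmpty then aParse line
    else aLoop2 ls capture

def get_companies (page_text : String) : List String :=
  -- page_text.split("\n"): separator is non-empty, so split? = some (splitOn …) — exact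
  let lines := PySem.Chars.splitOn page_text.toList ['\n']
  let companies := aLoop1 lines
  if companies.isEmpty then aLoop2 lines false else companies

-- ===== PORT B =====
def bCond (line : List Char) : Bool :=
  PySem.Chars.startswith line ("IBM Canada".toList) ||
  (!(PySem.Chars.startswith line ("Companies Offering Jobs".toList)) &&
   PySem.Chars.isIn ("IBM".toList) line && PySem.Chars.isIn ("Bell".toList) line)

def bParse (line : List Char) : List String :=
  ((((PySem.Chars.splitOn (PySem.Chars.replace line (" and more.".toList) ("".toList))
      (",".toList)).map PySem.Chars.strip).filter (fun c => !c.isEmpty)).map String.ofList)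

-- B's single pass: state (primary?, heading_seen, fallback?)
def bScan : List (List Char) → Option (List Char) → Bool → Option (List Char) →
    Option (List Char) × Bool × Option (List Char)
  | [], p, seen, fb => (p, seen, fb)
  | raw :: rest, p, seen, fb =>
    let line := PySem.Chars.strip raw
    let p' := if p.isNone && bCond line then some line else p
    if PySem.Chars.isIn ("Companies Offering Jobs".toList) line then
      bScan rest p' true fb
    else if seen && !line.isEmpty && fb.isNone then
      bScan rest p' seen (some line)
    else
      bScan rest p' seen fb

def get_companies_alt (page_text : String) : List String :=
  let st := bScan (PySem.Chars.splitOn page_text.toList ['\n']) none false none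
  match st.1 with
  | some l =>
    let companies := bParse l
    if companies.isEmpty then
      match st.2.2 with | some f => bParse f | none => []
    else companies
  | none => match st.2.2 with | some f => bParse f | none => []

-- ===== PRECONDITION & SPEC =====
def Spec_get_companies (page_text : String) (out : List String) : Prop := out = get_companies_alt page_text
instance (page_text : String) (out : List String) : Decidable (Spec_get_companies page_text out) := by unfold Spec_get_companies; infer_instance

-- ===== CLAIM (what is proved, stated in full; the proofs are below) =====
def Claim_equal_get_companies : Prop := ∀ (page_text : String), Dom_get_companies page_text → Spec_get_companies page_text (get_companies page_text)

-- ===== LEMMAS AND PROOFS =====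

-- what A's pipeline still owes after processing `lines` with fallback state (seen, fb)
def afterFb (lines : List (List Char)) (seen : Bool) (fb : Option (List Char)) : List String :=
  match fb with
  | some f => aParse f
  | none => aLoop2 lines seen

theorem aParse_eq_bParse (l : List Char) : aParse l = bParse l := rfl

theorem aLoop1_cons (l : List Char) (ls : List (List Char)) :
    aLoop1 (l :: ls) = if bCond (PySem.Chars.strip l) then aParse (PySem.Chars.strip l)
                       else aLoop1 ls := rfl

theorem aLoop2_cons (l : List Char) (ls : List (List Char)) (capture : Bool) :
    aLoop2 (l :: ls) capture =
      if PySem.Chars.isIn ("Companies Offering Jobs".toList) (PySem.Chars.strip l) then aLoop2 ls true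
      else if capture && !(PySem.Chars.strip l).isEmpty then aParse (PySem.Chars.strip l)
      else aLoop2 ls capture := rfl

theorem bScan_cons (raw : List Char) (rest : List (List Char)) (p : Option (List Char))
    (seen : Bool) (fb : Option (List Char)) :
    bScan (raw :: rest) p seen fb =
      (let line := PySem.Chars.strip raw
       let p' := if p.isNone && bCond line then some line else p
       if PySem.Chars.isIn ("Companies Offering Jobs".toList) line then bScan rest p' true fb
       else if seen && !line.isEmpty && fb.isNone then bScan rest p' seen (some line)
       else bScan rest p' seen fb) := rfl

theorem bScan_main (lines : List (List Char)) : ∀ (p : Option (List Char)) (seen : Bool)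
    (fb : Option (List Char)),
    (let st := bScan lines p seen fb
     match st.1 with
     | some l =>
       if (bParse l).isEmpty then (match st.2.2 with | some f => bParse f | none => [])
       else bParse l
     | none => match st.2.2 with | some f => bParse f | none => [])
    =
    (match p with
     | some l => if (bParse l).isEmpty then afterFb lines seen fb else bParse l
     | none => if (aLoop1 lines).isEmpty then afterFb lines seen fb else aLoop1 lines) := by
  induction lines with
  | nil =>
    intro p seen fb
    cases p <;> cases fb <;> simp [bScan, aLoop1, aLoop2, afterFb, aParse_eq_bParse]
  | cons l ls ih =>
    intro p seen fb
    rw [bScan_cons, aLoop1_cons]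
    cases p <;> cases fb <;>
      by_cases hhd : PySem.Chars.isIn ("Companies Offering Jobs".toList) (PySem.Chars.strip l) = true <;>
      by_cases hc : bCond (PySem.Chars.strip l) = true <;>
      by_cases hs : seen = true <;>
      by_cases hne : (PySem.Chars.strip l).isEmpty = true <;>
      simp [hhd, hc, hs, hne, afterFb, aLoop2_cons, aParse_eq_bParse,
            Bool.not_eq_true] at * <;>
      simp_all

-- ===== VERDICT (by name: the statement is the Claim_ definition above) =====
theorem get_companies_spec : Claim_equal_get_companies := by
  intro page_text _
  unfold Spec_get_companies get_companies get_companies_alt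
  have h := bScan_main (PySem.Chars.splitOn page_text.toList ['\n']) none false none
  simp only [afterFb] at h
  simp only [h]
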